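-- pv_equiv track=rewrite | github.com/dair-iitd/mb-mapo | src/eval_sd.py | terminate_at_last_test_eval
-- ===== SOURCE A (Python) =====
-- def terminate_at_last_test_eval(lines):
--
-- 	filtered_lines = []
-- 	reversed_range = list(reversed(range(0,len(lines))))
-- 	last_index = len(lines)
-- 	for i in reversed_range:
-- 		if "Test OOV F1" in lines[i]:
-- 			last_index = i+1
-- 			break
-- 		if "Test F1" in lines[i]:
-- 			last_index = i+1
-- 			break
--
-- 	return lines[:last_index]
-- ===== SOURCE B (Python) =====
-- def terminate_at_last_test_eval(lines):
-- 	idx = [i for i, l in enumerate(lines) if "Test OOV F1" in l or "Test F1" in l]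
-- 	last = idx[-1] + 1 if idx else len(lines)
-- 	return lines[:last]
-- ===== Notes on version B (the rewrite author's own statement) =====
-- stated objective: simpler
-- what changed: B replaces A's reversed-index loop with early break by a forward comprehension collecting all matching indices and slicing after the last one (or len(lines) when none).
import Mathlib
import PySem

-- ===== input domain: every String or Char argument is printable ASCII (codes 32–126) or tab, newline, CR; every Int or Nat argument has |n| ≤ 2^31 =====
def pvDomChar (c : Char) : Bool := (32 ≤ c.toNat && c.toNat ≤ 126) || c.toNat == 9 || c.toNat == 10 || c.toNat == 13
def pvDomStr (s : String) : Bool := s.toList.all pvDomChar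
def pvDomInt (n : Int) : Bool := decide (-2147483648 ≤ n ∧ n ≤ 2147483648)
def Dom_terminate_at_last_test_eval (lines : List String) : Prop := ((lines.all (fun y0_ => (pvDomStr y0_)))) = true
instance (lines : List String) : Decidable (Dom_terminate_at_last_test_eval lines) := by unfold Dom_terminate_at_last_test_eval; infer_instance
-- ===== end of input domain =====

-- B replaces A's reversed-index loop with 'break' by a forward comprehension over enumerate(lines)
-- collecting all matching indices and slicing after the last one (objective: simpler).


-- ===== PORT A =====
-- A's for-loop over reversed_range with two if/break branches
def pvLoopA (lines : List String) : List Int → Int → Int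
  | [], last_index => last_index
  | i :: rest, last_index =>
    if PySem.Str.isIn "Test OOV F1" (PySem.List.pyGetD lines i "") then i + 1
    else if PySem.Str.isIn "Test F1" (PySem.List.pyGetD lines i "") then i + 1
    else pvLoopA lines rest last_index

def terminate_at_last_test_eval (lines : List String) : List String :=
  let reversed_range := (PySem.List.pyRange 0 (lines.length : Int) 1).reverse
  let last_index := pvLoopA lines reversed_range (lines.length : Int)
  PySem.List.slice lines none (some last_index)

-- ===== PORT B =====
def terminate_at_last_test_eval_alt (lines : List String) : List String :=
  let idx := ((PySem.List.enumerate lines 0).filter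
      (fun p => PySem.Str.isIn "Test OOV F1" p.2 || PySem.Str.isIn "Test F1" p.2)).map (·.1)
  let last : Int :=
    match idx.getLast? with
    | some k => k + 1
    | none => (lines.length : Int)
  PySem.List.slice lines none (some last)

-- ===== PRECONDITION & SPEC =====
def Spec_terminate_at_last_test_eval (lines : List String) (out : List String) : Prop := out = terminate_at_last_test_eval_alt lines
instance (lines : List String) (out : List String) : Decidable (Spec_terminate_at_last_test_eval lines out) := by unfold Spec_terminate_at_last_test_eval; infer_instance

-- ===== CLAIM (what is proved, stated in full; the proofs are below) =====
def Claim_equal_terminate_at_last_test_eval : Prop := ∀ (lines : List String), Dom_terminate_at_last_test_eval lines → Spec_terminate_at_last_test_eval lines (terminate_at_last_test_eval lines)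

-- ===== LEMMAS AND PROOFS =====

-- A's loop returns (first matching index in the scanned list) + 1, else the default.
theorem pvLoopA_eq_find? (lines : List String) (l : List Int) (d : Int) :
    pvLoopA lines l d =
      (match l.find? (fun i => PySem.Str.isIn "Test OOV F1" (PySem.List.pyGetD lines i "")
          || PySem.Str.isIn "Test F1" (PySem.List.pyGetD lines i "")) with
        | some i => i + 1
        | none => d) := by
  induction l with
  | nil => rfl
  | cons i rest ih =>
    simp only [pvLoopA, List.find?_cons]
    cases h1 : PySem.Str.isIn "Test OOV F1" (PySem.List.pyGetD lines i "") <;>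
      cases h2 : PySem.Str.isIn "Test F1" (PySem.List.pyGetD lines i "") <;>
        simp [ih]

-- ===== VERDICT (by name: the statement is the Claim_ definition above) =====
theorem terminate_at_last_test_eval_spec : Claim_equal_terminate_at_last_test_eval := by
  unfold Claim_equal_terminate_at_last_test_eval
  intro lines _
  unfold Spec_terminate_at_last_test_eval terminate_at_last_test_eval terminate_at_last_test_eval_alt
  simp only []  -- zeta-reduce the let-bindings of both ports
  congr 1
  rw [pvLoopA_eq_find?]
  rw [List.getLast?_map, List.getLast?_eq_head?_reverse, ← List.filter_reverse, List.head?_filter,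
      PySem.List.enumerate_eq_map_pyRange lines "", ← List.map_reverse, List.find?_map,
      Option.map_map]
  simp only [Function.comp_def]
  simp
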